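-- pv_equiv track=rewrite | github.com/praveenkrishna0512/shan-centipede-image-generator | script.py | process_color_encoding_string
-- ===== SOURCE A (Python) =====
-- def process_color_encoding_string(color_encoding):
--     result = ""
--     for i in range(1, 10):
--         num_index_in_code = color_encoding.find(str(i))
--         if num_index_in_code == -1:
--             result += str(i) + "W"
--         else:
--             result += color_encoding[num_index_in_code : num_index_in_code + 2]
--     return result
-- ===== SOURCE B (Python) =====
-- def process_color_encoding_string(color_encoding):
--     slots = [str(d) + "W" for d in range(1, 10)]
--     for idx, ch in reversed(list(enumerate(color_encoding))):
--         if '1' <= ch <= '9':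
--             slots[ord(ch) - ord('1')] = color_encoding[idx:idx + 2]
--     return "".join(slots)
-- ===== Notes on version B (the rewrite author's own statement) =====
-- stated objective: alternative
-- what changed: B pre-fills a direct-address array of nine default cells and makes a single reverse pass over the string, unconditionally overwriting the cell indexed by the digit's code with its 2-char slice so the last write (leftmost occurrence) wins, then joins the array; A instead performs nine separate .find scans building the result left to right.
import Mathlib
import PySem

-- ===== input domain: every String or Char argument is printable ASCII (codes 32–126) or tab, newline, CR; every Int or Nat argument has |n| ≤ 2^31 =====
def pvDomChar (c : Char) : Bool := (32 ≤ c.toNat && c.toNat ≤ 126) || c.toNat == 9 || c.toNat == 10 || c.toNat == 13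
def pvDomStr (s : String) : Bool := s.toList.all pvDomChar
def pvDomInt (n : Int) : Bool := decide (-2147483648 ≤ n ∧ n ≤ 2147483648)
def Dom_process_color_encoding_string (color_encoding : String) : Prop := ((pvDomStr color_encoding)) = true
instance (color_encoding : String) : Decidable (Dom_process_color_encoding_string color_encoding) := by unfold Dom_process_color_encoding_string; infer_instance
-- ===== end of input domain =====

-- B replaces A's nine repeated .find scans with a pre-filled direct-address array of nine
-- default cells, one reverse pass overwriting cell ord(ch)-ord('1') with the 2-char slice
-- (last write = leftmost occurrence wins), then a join (objective: alternative algorithm).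


-- ===== PORT A =====
-- literal transliteration: result += over range(1,10); find + slice [idx:idx+2]
def process_color_encoding_string (color_encoding : String) : String :=
  String.ofList ((PySem.List.pyRange 1 10 1).foldl (fun result i =>
    let num_index_in_code := PySem.Chars.find color_encoding.toList (PySem.Int.toChars i)
    if num_index_in_code = -1 then
      result ++ PySem.Int.toChars i ++ ['W']
    else
      result ++ PySem.List.slice color_encoding.toList (some num_index_in_code)
        (some (num_index_in_code + 2))) [])

-- ===== PORT B =====
-- slots = [str(d) + "W" for d in range(1, 10)]
def pvSlots0 : List (List Char) :=
  (PySem.List.pyRange 1 10 1).map (fun d => PySem.Int.toChars d ++ ['W'])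

-- the loop body: if '1' <= ch <= '9': slots[ord(ch) - ord('1')] = color_encoding[idx:idx+2]
def pvStep (cs : List Char) (slots : List (List Char)) (p : Int × Char) : List (List Char) :=
  if '1' ≤ p.2 ∧ p.2 ≤ '9' then
    slots.set (p.2.toNat - '1'.toNat) (PySem.List.slice cs (some p.1) (some (p.1 + 2)))
  else slots

-- for idx, ch in reversed(list(enumerate(color_encoding))): …  then "".join(slots)
-- ("".join of a list of strings is exactly the flatten of the character lists)
def process_color_encoding_string_alt (color_encoding : String) : String :=
  String.ofList
    (((PySem.List.enumerate color_encoding.toList 0).reverse.foldl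
        (pvStep color_encoding.toList) pvSlots0).flatten)

-- ===== PRECONDITION & SPEC =====
def Spec_process_color_encoding_string (color_encoding : String) (out : String) : Prop := out = process_color_encoding_string_alt color_encoding
instance (color_encoding : String) (out : String) : Decidable (Spec_process_color_encoding_string color_encoding out) := by unfold Spec_process_color_encoding_string; infer_instance

-- ===== CLAIM (what is proved, stated in full; the proofs are below) =====
def Claim_equal_process_color_encoding_string : Prop := ∀ (color_encoding : String), Dom_process_color_encoding_string color_encoding → Spec_process_color_encoding_string color_encoding (process_color_encoding_string color_encoding)

-- ===== LEMMAS AND PROOFS =====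

-- find on a single-character needle returns the first index of that character
theorem pv_find_single (cs : List Char) (c : Char) (h : c ∈ cs) :
    PySem.Chars.find cs [c] = (cs.idxOf c : Int) := by
  have hinf : [c] <:+: cs := (List.singleton_infix_iff c cs).mpr h
  have hne : PySem.Chars.find cs [c] ≠ -1 := (PySem.Chars.find_ne_neg_one_iff cs [c]).mpr hinf
  have hne0 : PySem.Chars.findFrom cs [c] ((0 : Nat) : Int) ≠ -1 := by
    simpa [PySem.Chars.findFrom_zero] using hne
  obtain ⟨-, hpre, hmin⟩ := PySem.Chars.findFrom_natCast_spec cs [c] 0 (Nat.zero_le _) hne0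
  rw [show ((0:Nat):Int) = (0:Int) from rfl, PySem.Chars.findFrom_zero] at hpre hmin
  set n := PySem.Chars.find cs [c] with hn
  have hsing : ∀ j : Nat, ([c] <+: cs.drop j ↔ cs[j]? = some c) := by
    intro j
    rw [← List.head?_drop]
    constructor
    · rintro ⟨t, ht⟩; rw [← ht]; rfl
    · intro hh
      cases hd : cs.drop j with
      | nil => rw [hd] at hh; simp at hh
      | cons a t => rw [hd] at hh; simp at hh; exact ⟨t, by simp [hh]⟩
  have hget : cs[n.toNat]? = some c := (hsing _).mp hpre
  have hlen : n.toNat < cs.length := by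
    have := List.getElem?_eq_some_iff.mp hget
    exact this.1
  set j := cs.idxOf c with hj
  have hjlt : j < cs.length := List.idxOf_lt_length_of_mem h
  have hgetj : cs[j] = c := List.getElem_idxOf hjlt
  have h1 : ¬ j < n.toNat := by
    intro hlt
    exact hmin j (Nat.zero_le _) hlt ((hsing j).mpr (by simp [hjlt, hgetj]))
  have h2 : ¬ n.toNat < j := by
    intro hlt
    have := List.not_of_lt_findIdx (p := (· == c)) (xs := cs) (i := n.toNat) hlt
    have hgc : cs[n.toNat] = c := by
      have := List.getElem?_eq_some_iff.mp hget
      exact this.2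
    simp at this
    exact this hgc
  have hge := PySem.Chars.neg_one_le_find cs [c]
  omega

-- characters with equal code points are equal
theorem pv_char_eq (a b : Char) (h : a.toNat = b.toNat) : a = b := by
  apply Char.ext
  exact UInt32.toNat_inj.mp h

-- the reverse fold preserves the slot-array length
theorem pv_fold_length (full : List Char) (l : List (Int × Char)) (slots : List (List Char)) :
    (l.foldl (pvStep full) slots).length = slots.length := by
  induction l generalizing slots with
  | nil => rfl
  | cons p t ih =>
    rw [List.foldl_cons, ih]
    unfold pvStep
    split <;> simp

-- invariant of B's reverse overwrite pass: the final value of slot (c - '1') is the slice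
-- at the FIRST occurrence of c (the last write, since indices are processed descending)
theorem pv_fold_inv (full sub : List Char) (k : Nat) (slots : List (List Char))
    (hlen : slots.length = 9) (c : Char) (hc : '1' ≤ c ∧ c ≤ '9') :
    ((PySem.List.enumerate sub (k : Int)).reverse.foldl (pvStep full) slots)[c.toNat - '1'.toNat]?
    = if c ∈ sub then
        some (PySem.List.slice full (some ((k + sub.idxOf c : Nat) : Int))
          (some (((k + sub.idxOf c : Nat) : Int) + 2)))
      else slots[c.toNat - '1'.toNat]? := by
  have hcn : c.toNat - '1'.toNat < 9 := by
    have h1 : '1'.toNat ≤ c.toNat := hc.1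
    have h2 : c.toNat ≤ '9'.toNat := hc.2
    have e1 : '1'.toNat = 49 := rfl
    have e9 : '9'.toNat = 57 := rfl
    omega
  induction sub generalizing k slots with
  | nil => simp
  | cons x xs ih =>
    have henum : PySem.List.enumerate (x :: xs) (k : Int)
        = ((k : Int), x) :: PySem.List.enumerate xs ((k : Int) + 1) := by
      simp [PySem.List.enumerate_cons]
    have hk1 : ((k : Int) + 1) = ((k + 1 : Nat) : Int) := by push_cast; ring
    rw [henum, hk1, List.reverse_cons, List.foldl_append, List.foldl_cons, List.foldl_nil]
    set inner := (PySem.List.enumerate xs ((k + 1 : Nat) : Int)).reverse.foldl (pvStep full) slots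
      with hinner
    have hinlen : inner.length = 9 := by rw [hinner, pv_fold_length, hlen]
    by_cases hx : x = c
    · subst hx
      have : pvStep full inner ((k : Int), x)
          = inner.set (x.toNat - '1'.toNat)
              (PySem.List.slice full (some (k : Int)) (some ((k : Int) + 2))) := by
        unfold pvStep; rw [if_pos hc]
      rw [this, List.getElem?_set_self (by omega)]
      rw [if_pos List.mem_cons_self, List.idxOf_cons_self]
      simp
    · have hidx : (x :: xs).idxOf c = xs.idxOf c + 1 := by simp [hx]
      have hmem : (c ∈ x :: xs) ↔ (c ∈ xs) := by
        constructor
        · intro h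
          rcases List.mem_cons.mp h with h | h
          · exact absurd h.symm hx
          · exact h
        · exact fun h => List.mem_cons_of_mem _ h
      have hstep : (pvStep full inner ((k : Int), x))[c.toNat - '1'.toNat]?
          = inner[c.toNat - '1'.toNat]? := by
        unfold pvStep
        split
        · next hdig =>
          apply List.getElem?_set_ne
          intro heq
          have h1 : '1'.toNat ≤ x.toNat := hdig.1
          have h2 : x.toNat ≤ '9'.toNat := hdig.2
          have h3 : '1'.toNat ≤ c.toNat := hc.1
          have hxc : x.toNat = c.toNat := by
            simp only at heq
            omega
          exact hx (pv_char_eq x c hxc)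
        · rfl
      rw [hstep, hinner, ih (k + 1) slots hlen, hidx]
      have harith : (k + 1) + xs.idxOf c = k + (xs.idxOf c + 1) := by omega
      rw [harith]
      by_cases hm : c ∈ xs
      · rw [if_pos hm, if_pos (hmem.mpr hm)]
      · rw [if_neg hm, if_neg (fun h => hm (hmem.mp h))]

-- per-digit chunk: A's find-and-slice branch, as a function of the digit character
def pvChunk (cs : List Char) (c : Char) : List Char :=
  if PySem.Chars.find cs [c] = -1 then [c] ++ ['W']
  else PySem.List.slice cs (some (PySem.Chars.find cs [c]))
    (some (PySem.Chars.find cs [c] + 2))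

-- the final slot array is exactly the list of A's nine chunks
theorem pv_slots_final (cs : List Char) :
    (PySem.List.enumerate cs 0).reverse.foldl (pvStep cs) pvSlots0
    = [pvChunk cs '1', pvChunk cs '2', pvChunk cs '3', pvChunk cs '4', pvChunk cs '5',
       pvChunk cs '6', pvChunk cs '7', pvChunk cs '8', pvChunk cs '9'] := by
  have hlen0 : pvSlots0.length = 9 := by decide
  have hlen : ((PySem.List.enumerate cs 0).reverse.foldl (pvStep cs) pvSlots0).length = 9 := by
    rw [pv_fold_length, hlen0]
  have hslot : ∀ (c : Char), '1' ≤ c ∧ c ≤ '9' →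
      ((PySem.List.enumerate cs 0).reverse.foldl (pvStep cs) pvSlots0)[c.toNat - '1'.toNat]?
      = some (pvChunk cs c) := by
    intro c hc
    have h0 : ((0 : Nat) : Int) = (0 : Int) := rfl
    have := pv_fold_inv cs cs 0 pvSlots0 hlen0 c hc
    rw [h0] at this
    rw [this]
    by_cases hm : c ∈ cs
    · rw [if_pos hm]
      unfold pvChunk
      rw [pv_find_single cs c hm, if_neg (by omega : ¬ ((cs.idxOf c : Int) = -1))]
      simp
    · rw [if_neg hm]
      unfold pvChunk
      rw [(PySem.Chars.find_eq_neg_one_iff cs [c]).mpr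
            (fun hin => hm ((List.singleton_infix_iff c cs).mp hin)), if_pos rfl]
      -- the untouched default cell is str(d) + "W"
      have h1 : '1'.toNat ≤ c.toNat := hc.1
      have h9 : c.toNat ≤ '9'.toNat := hc.2
      have e1 : '1'.toNat = 49 := rfl
      have e9 : '9'.toNat = 57 := rfl
      rcases (by omega : c.toNat = 49 ∨ c.toNat = 50 ∨ c.toNat = 51 ∨ c.toNat = 52 ∨
          c.toNat = 53 ∨ c.toNat = 54 ∨ c.toNat = 55 ∨ c.toNat = 56 ∨ c.toNat = 57)
        with h|h|h|h|h|h|h|h|h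
      · rw [pv_char_eq c '1' h]; decide
      · rw [pv_char_eq c '2' h]; decide
      · rw [pv_char_eq c '3' h]; decide
      · rw [pv_char_eq c '4' h]; decide
      · rw [pv_char_eq c '5' h]; decide
      · rw [pv_char_eq c '6' h]; decide
      · rw [pv_char_eq c '7' h]; decide
      · rw [pv_char_eq c '8' h]; decide
      · rw [pv_char_eq c '9' h]; decide
  apply List.ext_getElem?
  intro i
  by_cases hi : i < 9
  · rcases (by omega : i = 0 ∨ i = 1 ∨ i = 2 ∨ i = 3 ∨ i = 4 ∨ i = 5 ∨ i = 6 ∨ i = 7 ∨ i = 8)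
      with h|h|h|h|h|h|h|h|h <;> subst h <;>
      simp only [List.getElem?_cons_zero, List.getElem?_cons_succ]
    · exact hslot '1' (by decide)
    · exact hslot '2' (by decide)
    · exact hslot '3' (by decide)
    · exact hslot '4' (by decide)
    · exact hslot '5' (by decide)
    · exact hslot '6' (by decide)
    · exact hslot '7' (by decide)
    · exact hslot '8' (by decide)
    · exact hslot '9' (by decide)
  · rw [List.getElem?_eq_none
        (show ((PySem.List.enumerate cs 0).reverse.foldl (pvStep cs) pvSlots0).length ≤ i by
          rw [hlen]; omega),
      List.getElem?_eq_none (by simp only [List.length_cons, List.length_nil]; omega)]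

theorem pv_main (s : String) :
    process_color_encoding_string s = process_color_encoding_string_alt s := by
  have hR : PySem.List.pyRange 1 10 1 = [1,2,3,4,5,6,7,8,9] := by decide
  unfold process_color_encoding_string process_color_encoding_string_alt
  rw [pv_slots_final, hR]
  simp only [List.foldl_cons, List.foldl_nil, List.flatten]
  show String.ofList _ = String.ofList _
  congr 1
  have hstep : ∀ (acc : List Char) (c : Char),
      (let n := PySem.Chars.find s.toList [c]
       if n = -1 then acc ++ [c] ++ ['W']
       else acc ++ PySem.List.slice s.toList (some n) (some (n + 2)))
      = acc ++ pvChunk s.toList c := by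
    intro acc c
    unfold pvChunk
    by_cases h : PySem.Chars.find s.toList [c] = -1 <;> simp [h]
  have h1 : PySem.Int.toChars 1 = ['1'] := rfl
  have h2 : PySem.Int.toChars 2 = ['2'] := rfl
  have h3 : PySem.Int.toChars 3 = ['3'] := rfl
  have h4 : PySem.Int.toChars 4 = ['4'] := rfl
  have h5 : PySem.Int.toChars 5 = ['5'] := rfl
  have h6 : PySem.Int.toChars 6 = ['6'] := rfl
  have h7 : PySem.Int.toChars 7 = ['7'] := rfl
  have h8 : PySem.Int.toChars 8 = ['8'] := rfl
  have h9 : PySem.Int.toChars 9 = ['9'] := rfl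
  simp only [h1, h2, h3, h4, h5, h6, h7, h8, h9, hstep]
  simp

-- ===== VERDICT (by name: the statement is the Claim_ definition above) =====
theorem process_color_encoding_string_spec : Claim_equal_process_color_encoding_string := by
  intro s _
  unfold Spec_process_color_encoding_string
  exact pv_main s
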